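-- pv_equiv track=rewrite | github.com/ImageKai/360_flight_planner | flight_plan_generation_args.py | actionID_generation
-- ===== SOURCE A (Python) =====
-- def actionID_generation(action_input,num_groups = 2):
--     actionNum = 2
--     actionID = [0]
--     for i in action_input[1:]:
--         if i == 0:  # Compare each element 'i', not the entire list
--             actionNum += 1
--         else:
--             actionNum += 2
--         actionID.append(actionNum)
--     return actionID
-- ===== SOURCE B (Python) =====
-- def actionID_generation(action_input, num_groups=2):
--     # Segment algorithm: a zero at tail position i starts a new segment at output
--     # index i+1; within a segment the values form an arithmetic run of step 2,
--     # and the number of zeros seen so far is just the segment's index.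
--     tail = action_input[1:]
--     n = len(tail)
--     cuts = [i + 1 for i, x in enumerate(tail) if x == 0] + [n + 1]
--     out = [0]
--     for z, (lo, hi) in enumerate(zip([1] + cuts, cuts)):
--         out.extend(2 * k + 2 - z for k in range(lo, hi))
--     return out
-- ===== Notes on version B (the rewrite author's own statement) =====
-- stated objective: alternative
-- what changed: Replaced A's per-element running counter by a segment algorithm: first locate the zero positions (the cuts), then emit the output as arithmetic runs of step 2 between consecutive cuts, taking the zero-count from the segment's index instead of accumulating it element by element.
import Mathlib
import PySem

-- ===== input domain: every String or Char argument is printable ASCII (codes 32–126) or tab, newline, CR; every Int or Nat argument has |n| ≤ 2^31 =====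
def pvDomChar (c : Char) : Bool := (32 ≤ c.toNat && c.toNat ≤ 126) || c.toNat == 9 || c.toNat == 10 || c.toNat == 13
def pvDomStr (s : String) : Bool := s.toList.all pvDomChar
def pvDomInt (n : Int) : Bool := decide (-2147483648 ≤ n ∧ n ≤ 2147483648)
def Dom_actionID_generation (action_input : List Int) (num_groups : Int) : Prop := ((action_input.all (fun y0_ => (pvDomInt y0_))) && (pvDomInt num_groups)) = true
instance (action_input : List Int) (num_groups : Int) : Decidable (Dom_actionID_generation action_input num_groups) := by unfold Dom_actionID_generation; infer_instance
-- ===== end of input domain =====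

-- B replaces A's per-element running counter by a segment algorithm: locate the zeros, then emit arithmetic runs of step 2 between consecutive cuts, the zero-count being the segment's index.

-- ===== PORT A =====
-- literal port of A: running counter actionNum, list actionID grown by append, one loop over action_input[1:]
def actionID_generation (action_input : List Int) (num_groups : Int) : List Int :=
  (PySem.List.slice action_input (some 1) none).foldl
    (fun (st : Int × List Int) i =>
      let actionNum := if i == 0 then st.1 + 1 else st.1 + 2
      (actionNum, st.2 ++ [actionNum]))
    ((2 : Int), [(0 : Int)])
  |>.2

-- ===== PORT B =====
-- port of Source B: cuts = [i+1 for zeros] + [n+1]; then for z,(lo,hi) in enumerate(zip([1]+cuts, cuts)): extend with 2*k+2-z for k in range(lo,hi)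
def actionID_generation_alt (action_input : List Int) (num_groups : Int) : List Int :=
  let tail := PySem.List.slice action_input (some 1) none
  let n : Int := tail.length
  let cuts : List Int :=
    ((PySem.List.enumerate tail 0).filterMap
      (fun ix => if ix.2 == 0 then some (ix.1 + 1) else none)) ++ [n + 1]
  (PySem.List.enumerate (((1 : Int) :: cuts).zip cuts) 0).foldl
    (fun out zp => out ++ (PySem.List.pyRange zp.2.1 zp.2.2 1).map (fun k => 2 * k + 2 - zp.1))
    [(0 : Int)]

-- ===== PRECONDITION & SPEC =====
def Spec_actionID_generation (action_input : List Int) (num_groups : Int) (out : List Int) : Prop := out = actionID_generation_alt action_input num_groups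
instance (action_input : List Int) (num_groups : Int) (out : List Int) : Decidable (Spec_actionID_generation action_input num_groups out) := by unfold Spec_actionID_generation; infer_instance

-- ===== CLAIM =====
def Claim_equal_actionID_generation : Prop := ∀ (action_input : List Int) (num_groups : Int), Dom_actionID_generation action_input num_groups → Spec_actionID_generation action_input num_groups (actionID_generation action_input num_groups)

-- ===== LEMMAS AND PROOFS =====

-- reference form of A's running counter: prefix sums of the increments
def pvAccum (s : Int) : List Int → List Int
  | [] => []
  | v :: vs => (s + v) :: pvAccum (s + v) vs

-- A's fold, for a step that adds g i and appends, accumulates prefix sums of the increments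
theorem foldA_gen (g : Int → Int) (l : List Int) (n : Int) (acc : List Int) :
    ((l.foldl (fun (st : Int × List Int) i =>
        (st.1 + g i, st.2 ++ [st.1 + g i])) (n, acc)).2)
    = acc ++ pvAccum n (l.map g) := by
  induction l generalizing n acc with
  | nil => simp [pvAccum]
  | cons i rest ih =>
      simp only [List.foldl_cons, List.map_cons, pvAccum]
      have := ih (n + g i) (acc ++ [n + g i])
      simpa using this

-- A's step function written in that shape
theorem stepA_eq :
    (fun (st : Int × List Int) (i : Int) =>
      let actionNum := if i == 0 then st.1 + 1 else st.1 + 2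
      (actionNum, st.2 ++ [actionNum]))
    = (fun (st : Int × List Int) i =>
        (st.1 + (if i == 0 then (1 : Int) else 2),
         st.2 ++ [st.1 + (if i == 0 then (1 : Int) else 2)])) := by
  funext st i
  by_cases h : i = 0 <;> simp [h]

-- canonical per-index form shared by both proofs: out[j+1] = base + 2*(j+1) - zeros in take (j+1)
theorem accum_closed (l : List Int) (s : Int) :
    pvAccum s (l.map (fun x => if x == 0 then (1 : Int) else 2)) =
    (List.range l.length).map
      (fun (j : Nat) => s + 2 * ((j : Int) + 1) - ((l.take (j + 1)).count 0 : Int)) := by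
  induction l generalizing s with
  | nil => rfl
  | cons x xs ih =>
      simp only [List.map_cons, pvAccum, List.length_cons, List.range_succ_eq_map,
        List.map_map]
      congr 1
      · by_cases h : x = 0 <;> simp [h, List.count_cons] <;> omega
      · rw [ih (s + (if x == 0 then (1 : Int) else 2))]
        apply List.map_congr_left
        intro j _
        simp only [Function.comp_apply, List.take_succ_cons, List.count_cons]
        by_cases h : x = 0 <;> simp [h] <;> push_cast <;> ring

-- B-side reference: zero cut positions of l, first element having cut value s
def pvZp : List Int → Int → List Int
  | [], _ => []
  | x :: xs, s => (if x == 0 then [s] else []) ++ pvZp xs (s + 1)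

-- B-side reference: the concatenated arithmetic runs between consecutive cuts
def pvChunks : Int → Int → List Int → List Int
  | _, _, [] => []
  | z, lo, c :: cs => (PySem.List.pyRange lo c 1).map (fun k => 2 * k + 2 - z) ++ pvChunks (z + 1) c cs

-- the port's enumerate+filterMap comprehension computes pvZp
theorem filterMap_enum_eq_zp (l : List Int) (s : Int) :
    (PySem.List.enumerate l s).filterMap
      (fun ix => if ix.2 == 0 then some (ix.1 + 1) else none) = pvZp l (s + 1) := by
  induction l generalizing s with
  | nil => simp [pvZp, PySem.List.enumerate_nil]
  | cons x xs ih =>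
      have hih := ih (s + 1)
      rw [PySem.List.enumerate_cons]
      by_cases h : x = 0 <;> simp [pvZp, h] at hih ⊢ <;> exact hih

-- the port's fold over the enumerated zipped cut pairs computes pvChunks
theorem fold_enum_zip_eq_chunks (cs : List Int) (lo z : Int) (acc : List Int) :
    (PySem.List.enumerate ((lo :: cs).zip cs) z).foldl
      (fun out zp => out ++ (PySem.List.pyRange zp.2.1 zp.2.2 1).map (fun k => 2 * k + 2 - zp.1))
      acc = acc ++ pvChunks z lo cs := by
  induction cs generalizing lo z acc with
  | nil => simp [pvChunks, PySem.List.enumerate_nil]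
  | cons c cs' ih =>
      rw [List.zip_cons_cons, PySem.List.enumerate_cons]
      simp only [List.foldl_cons, pvChunks]
      rw [ih c (z + 1) _, List.append_assoc]

-- peeling one index off the leading run of a chunk list
theorem chunks_cons_lt (z lo c : Int) (cs : List Int) (h : lo < c) :
    pvChunks z lo (c :: cs) = (2 * lo + 2 - z) :: pvChunks z (lo + 1) (c :: cs) := by
  simp only [pvChunks]
  rw [PySem.List.pyRange_one_cons h]
  simp

-- every cut produced by pvZp is at least the starting value
theorem zp_lower_bound (l : List Int) (s c : Int) (hc : c ∈ pvZp l s) : s ≤ c := by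
  induction l generalizing s with
  | nil => simp [pvZp] at hc
  | cons x xs ih =>
      simp only [pvZp, List.mem_append] at hc
      rcases hc with hc | hc
      · by_cases h : x = 0 <;> simp [h] at hc; omega
      · have := ih (s + 1) hc; omega

-- main segment lemma: the chunked runs over the cuts of l equal the canonical per-index form
theorem chunks_zp_closed (l : List Int) (s z : Int) :
    pvChunks z s (pvZp l s ++ [s + l.length]) =
    (List.range l.length).map
      (fun (j : Nat) => 2 * (s + (j : Int)) + 2 - (z + ((l.take (j + 1)).count 0 : Int))) := by
  induction l generalizing s z with
  | nil =>
      simp only [pvZp, List.length_nil, List.nil_append]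
      simp [pvChunks]
  | cons x xs ih =>
      have hstep : ∀ (z' : Int),
          pvChunks z' s (pvZp xs (s + 1) ++ [s + 1 + (xs.length : Int)]) =
          (2 * s + 2 - z') :: pvChunks z' (s + 1) (pvZp xs (s + 1) ++ [s + 1 + (xs.length : Int)]) := by
        intro z'
        cases hR : pvZp xs (s + 1) ++ [s + 1 + (xs.length : Int)] with
        | nil => exact absurd hR (by simp)
        | cons c cs =>
            have hc : s < c := by
              rcases List.mem_append.mp (hR ▸ List.mem_cons_self) with h | h
              · have := zp_lower_bound xs (s + 1) c h; omega
              · simp at h; omega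
            exact chunks_cons_lt z' s c cs hc
      by_cases h : x = 0
      · -- a zero: new cut at s, zero-count rises to z+1 from index s on
        subst h
        have h0 : ((0 : Int) == 0) = true := rfl
        have hpr : PySem.List.pyRange s s 1 = [] := by rw [PySem.List.pyRange_one]; simp
        simp only [pvZp, h0, if_true, List.length_cons, List.cons_append]
        simp only [pvChunks, hpr, List.map_nil, List.nil_append]
        rw [show s + ((xs.length : Nat) + 1 : Nat) = s + 1 + (xs.length : Int) from by push_cast; ring]
        rw [hstep (z + 1), ih (s + 1) (z + 1), List.range_succ_eq_map, List.map_cons, List.map_map]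
        congr 1
        · simp
        · apply List.map_congr_left
          intro j _
          simp only [Function.comp_apply, List.take_succ_cons, List.count_cons, h0]
          push_cast [Nat.succ_eq_add_one]
          ring
      · -- not a zero: no cut here, same zero-count continues
        have h0 : (x == 0) = false := by simpa using h
        simp only [pvZp, h0, Bool.false_eq_true, if_false, List.length_cons, List.nil_append]
        rw [show s + ((xs.length : Nat) + 1 : Nat) = s + 1 + (xs.length : Int) from by push_cast; ring]
        rw [hstep z, ih (s + 1) z, List.range_succ_eq_map, List.map_cons, List.map_map]
        congr 1
        · simp [List.count_cons, h0]
        · apply List.map_congr_left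
          intro j _
          simp only [Function.comp_apply, List.take_succ_cons, List.count_cons, h0]
          push_cast [Nat.succ_eq_add_one]
          ring

-- ===== VERDICT =====
theorem actionID_generation_spec : Claim_equal_actionID_generation := by
  intro action_input num_groups _
  unfold Spec_actionID_generation actionID_generation actionID_generation_alt
  rw [stepA_eq, foldA_gen]
  set tail := PySem.List.slice action_input (some 1) none with htail
  simp only []
  rw [filterMap_enum_eq_zp tail 0, fold_enum_zip_eq_chunks]
  rw [show (0 : Int) + 1 = 1 from by ring]
  rw [show ((tail.length : Int) + 1) = 1 + (tail.length : Int) from by ring]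
  rw [chunks_zp_closed tail 1 0, accum_closed tail 2]
  simp only [List.singleton_append]
  congr 1
  apply List.map_congr_left
  intro j _
  ring
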